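-- pv_equiv track=rewrite | github.com/AldoLunaBueno/Algorithmic_Thinking | 5_graphs_and_bfs/knight_chase/knight_chase.py | fill_min_board
-- ===== SOURCE A (Python) =====
-- from typing import List, Tuple
--
-- def fill_min_board(r, c, kr, kc):
--     N = r * c
--     board = [[N]*(r+1) for _ in range(c+1)]
--     num_moves = 0
--     board[kc][kr] = num_moves
--     visited = [(kc, kr)]
--     while True:
--         num_moves = num_moves + 1
--         next_to_visit = []
--         for from_position in visited:
--             for i, j in moves(from_position, c, r):
--                 if num_moves < board[i][j]:
--                     board[i][j] = num_moves
--                     next_to_visit.append((i,j))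
--         visited = next_to_visit
--         if len(visited) == 0:
--             break
--     return board
--
-- def moves(from_position: Tuple, c, r):
--     i, j = from_position
--     all_moves = [
--         (i+1, j+2), (i+2, j+1),
--         (i-1, j-2), (i-2, j-1),
--         (i+2, j-1), (i+1, j-2),
--         (i-2, j+1), (i-1, j+2)
--     ]
--     result = [(i, j) for i, j in all_moves
--               if (1 <= i <= c) and (1 <= j <= r)]
--     return result
-- ===== SOURCE B (Python) =====
-- # LIFO label-correcting relaxation: a stack of (cell, distance) candidates,
-- # popped depth-first; a cell's value may be improved several times before the
-- # board settles to the same fixpoint as A's level BFS.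
-- OFFSETS = [(1, 2), (2, 1), (-1, -2), (-2, -1), (2, -1), (1, -2), (-2, 1), (-1, 2)]
--
-- def fill_min_board(r, c, kr, kc):
--     N = r * c
--     board = [[N] * (r + 1) for _ in range(c + 1)]
--     board[kc][kr] = 0
--     stack = [(kc, kr, 0)]
--     while stack:
--         i, j, dist = stack.pop()
--         nd = dist + 1
--         for di, dj in OFFSETS:
--             ni, nj = i + di, j + dj
--             if 1 <= ni <= c and 1 <= nj <= r and board[ni][nj] > nd:
--                 board[ni][nj] = nd
--                 stack.append((ni, nj, nd))
--     return board
-- ===== Notes on version B (the rewrite author's own statement) =====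
-- stated objective: alternative
-- what changed: Replaces A's level-synchronous BFS (frontier lists rebuilt per round with a global move counter, each cell finalized once) with a LIFO label-correcting relaxation: a stack of (cell, distance) candidates popped in depth-first order, so a cell's value can be written and later improved several times; the board converges to the same fixpoint.
import Mathlib
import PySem

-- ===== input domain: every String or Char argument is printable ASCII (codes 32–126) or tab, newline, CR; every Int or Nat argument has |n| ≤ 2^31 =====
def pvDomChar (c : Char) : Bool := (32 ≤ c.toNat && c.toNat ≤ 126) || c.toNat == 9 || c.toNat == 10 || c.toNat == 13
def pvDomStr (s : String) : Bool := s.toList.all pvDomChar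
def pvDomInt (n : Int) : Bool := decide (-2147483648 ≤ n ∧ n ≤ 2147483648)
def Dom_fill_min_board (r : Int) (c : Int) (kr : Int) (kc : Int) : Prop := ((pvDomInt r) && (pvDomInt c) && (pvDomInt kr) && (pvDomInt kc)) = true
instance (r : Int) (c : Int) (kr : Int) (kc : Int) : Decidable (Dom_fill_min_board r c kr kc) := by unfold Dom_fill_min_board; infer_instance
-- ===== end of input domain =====

-- B replaces A's level-synchronous BFS (frontier lists + global move counter) with a
-- LIFO label-correcting relaxation (a stack of (cell, distance) candidates, popped
-- depth-first, cells improvable several times); same return value on every input A accepts.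

-- Shared low-level board primitives (both Pythons read/write board cells the same way).
-- board[i][j] read; indices used by both programs at read sites are the bounds-checked
-- interior coordinates 1..c × 1..r, nonnegative and in range, where getD is exact Python indexing.
def pvGet2 (b : List (List Int)) (i j : Int) : Int :=
  (b.getD i.toNat []).getD j.toNat 0

-- board[i][j] = v at the same in-range nonnegative coordinates (exact there).
def pvSet2 (b : List (List Int)) (i j : Int) (v : Int) : List (List Int) :=
  b.set i.toNat ((b.getD i.toNat []).set j.toNat v)

-- board[kc][kr] = v with Python's negative-index wraparound; the IndexError cases are
-- excluded by Pre_fill_min_board.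
def pvSetStart (b : List (List Int)) (i j : Int) (v : Int) : List (List Int) :=
  let i' : Int := if i < 0 then i + b.length else i
  let row := b.getD i'.toNat []
  let j' : Int := if j < 0 then j + row.length else j
  pvSet2 b i' j' v

-- ===== PORT A =====
-- helper `moves(from_position, c, r)` of A, literally.
def pvMoves (p : Int × Int) (c r : Int) : List (Int × Int) :=
  ([(p.1 + 1, p.2 + 2), (p.1 + 2, p.2 + 1),
    (p.1 - 1, p.2 - 2), (p.1 - 2, p.2 - 1),
    (p.1 + 2, p.2 - 1), (p.1 + 1, p.2 - 2),
    (p.1 - 2, p.2 + 1), (p.1 - 1, p.2 + 2)] : List (Int × Int)).filter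
    (fun q => decide (1 ≤ q.1 ∧ q.1 ≤ c ∧ 1 ≤ q.2 ∧ q.2 ≤ r))

-- A's inner `for i, j in moves(...)` loop, state = (board, next_to_visit).
def pvAInner (nm : Int) (st : List (List Int) × List (Int × Int)) (ms : List (Int × Int)) :
    List (List Int) × List (Int × Int) :=
  ms.foldl (fun st q =>
    if nm < pvGet2 st.1 q.1 q.2 then (pvSet2 st.1 q.1 q.2 nm, st.2 ++ [q]) else st) st

-- A's `for from_position in visited` loop (one round of the while loop).
def pvALevel (c r nm : Int) (st : List (List Int) × List (Int × Int)) (vs : List (Int × Int)) :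
    List (List Int) × List (Int × Int) :=
  vs.foldl (fun st p => pvAInner nm st (pvMoves p c r)) st

-- A's `while True` loop; fuel counts rounds, proved sufficient below (pvALoop_suff):
-- Python's loop always terminates within r*c+2 rounds.
def pvALoop (c r : Int) : Nat → List (List Int) → List (Int × Int) → Int → Option (List (List Int))
  | 0, _, _, _ => none
  | f + 1, b, vs, d =>
    let nm := d + 1
    let s := pvALevel c r nm (b, []) vs
    if s.2 = [] then some s.1 else pvALoop c r f s.1 s.2 nm

def fill_min_board (r : Int) (c : Int) (kr : Int) (kc : Int) : List (List Int) :=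
  let N := r * c
  let b0 := List.replicate (c + 1).toNat (List.replicate (r + 1).toNat N)
  let b1 := pvSetStart b0 kc kr 0
  (pvALoop c r (N + 2).toNat b1 [(kc, kr)] 0).getD b1

-- ===== PORT B =====
-- OFFSETS of Source B.
def pvOffs : List (Int × Int) := [(1, 2), (2, 1), (-1, -2), (-2, -1), (2, -1), (1, -2), (-2, 1), (-1, 2)]

-- processing of one popped candidate: the `for di, dj in OFFSETS` loop, state = (board, stack).
def pvBStep (c r nd : Int) (p : Int × Int) (st : List (List Int) × List (Int × Int × Int)) :
    List (List Int) × List (Int × Int × Int) :=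
  pvOffs.foldl (fun st o =>
    let ni := p.1 + o.1
    let nj := p.2 + o.2
    if 1 ≤ ni ∧ ni ≤ c ∧ 1 ≤ nj ∧ nj ≤ r then
      (if pvGet2 st.1 ni nj > nd then (pvSet2 st.1 ni nj nd, st.2 ++ [(ni, nj, nd)]) else st)
    else st) st

-- Source B's `while stack` loop: stack.pop() takes the LAST element, appends go at the end;
-- fuel counts pops, proved sufficient below (pvSLoop_suff): the stack empties after at
-- most r*c*(r+1)*(c+1)+2 pops.
def pvSLoop (c r : Int) : Nat → List (List Int) → List (Int × Int × Int) → Option (List (List Int))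
  | _, b, [] => some b
  | 0, _, _ :: _ => none
  | f + 1, b, e :: q =>
    let p := (e :: q).getLast (List.cons_ne_nil e q)
    let s := pvBStep c r (p.2.2 + 1) (p.1, p.2.1) (b, (e :: q).dropLast)
    pvSLoop c r f s.1 s.2

def fill_min_board_alt (r : Int) (c : Int) (kr : Int) (kc : Int) : List (List Int) :=
  let N := r * c
  let b0 := List.replicate (c + 1).toNat (List.replicate (r + 1).toNat N)
  let b1 := pvSetStart b0 kc kr 0
  (pvSLoop c r (N * (r + 1) * (c + 1) + 2).toNat b1 [(kc, kr, 0)]).getD b1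

-- ===== PRECONDITION & SPEC =====
-- Pre_ is exactly the set of inputs on which Python A returns normally: outside it the
-- initial assignment board[kc][kr] = 0 raises IndexError (no other statement can raise).
def Pre_fill_min_board (r : Int) (c : Int) (kr : Int) (kc : Int) : Prop :=
  -(c + 1) ≤ kc ∧ kc ≤ c ∧ -(r + 1) ≤ kr ∧ kr ≤ r
instance (r : Int) (c : Int) (kr : Int) (kc : Int) : Decidable (Pre_fill_min_board r c kr kc) := by
  unfold Pre_fill_min_board; infer_instance

def pvWitness_fill_min_board : Int × Int × Int × Int := (2, 2, 1, 1)

def Spec_fill_min_board (r : Int) (c : Int) (kr : Int) (kc : Int) (out : List (List Int)) : Prop := out = fill_min_board_alt r c kr kc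
instance (r : Int) (c : Int) (kr : Int) (kc : Int) (out : List (List Int)) : Decidable (Spec_fill_min_board r c kr kc out) := by unfold Spec_fill_min_board; infer_instance

-- ===== CLAIM (what is proved, stated in full; the proofs are below) =====
def Claim_equal_fill_min_board : Prop := ∀ (r : Int) (c : Int) (kr : Int) (kc : Int), Dom_fill_min_board r c kr kc → Pre_fill_min_board r c kr kc → Spec_fill_min_board r c kr kc (fill_min_board r c kr kc)

-- ===== LEMMAS AND PROOFS =====

-- proof device: the FIFO variant of the same candidate loop (pop the head instead of the
-- last element); A's level loop is simulated by it, and both it and B's stack loop are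
-- proved to reach the same fixpoint.
def pvBLoop (c r : Int) : Nat → List (List Int) → List (Int × Int × Int) → Option (List (List Int))
  | _, b, [] => some b
  | 0, _, _ :: _ => none
  | f + 1, b, (i, j, dist) :: q =>
    let s := pvBStep c r (dist + 1) (i, j) (b, q)
    pvBLoop c r f s.1 s.2

-- tag a frontier cell with its distance, as it sits in the FIFO queue
def pvTag (d : Int) (p : Int × Int) : Int × Int × Int := (p.1, p.2, d)

-- all board cells ≤ N
def pvValLe (N : Int) (b : List (List Int)) : Prop := ∀ i j : Int, pvGet2 b i j ≤ N

-- potential: total toNat-mass of the board (each push strictly decreases it)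
def pvRowSum (row : List Int) : Nat := (row.map Int.toNat).sum
def pvPhi (b : List (List Int)) : Nat := (b.map pvRowSum).sum

-- the step functions of the two inner folds, named for the proofs
def pvAF (nm : Int) (st : List (List Int) × List (Int × Int)) (q : Int × Int) :
    List (List Int) × List (Int × Int) :=
  if nm < pvGet2 st.1 q.1 q.2 then (pvSet2 st.1 q.1 q.2 nm, st.2 ++ [q]) else st

def pvBF (c r nd : Int) (p : Int × Int) (st : List (List Int) × List (Int × Int × Int))
    (o : Int × Int) : List (List Int) × List (Int × Int × Int) :=
  if 1 ≤ p.1 + o.1 ∧ p.1 + o.1 ≤ c ∧ 1 ≤ p.2 + o.2 ∧ p.2 + o.2 ≤ r then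
    (if pvGet2 st.1 (p.1 + o.1) (p.2 + o.2) > nd then
      (pvSet2 st.1 (p.1 + o.1) (p.2 + o.2) nd, st.2 ++ [(p.1 + o.1, p.2 + o.2, nd)])
     else st)
  else st

lemma pvAInner_as_fold (nm : Int) (st : List (List Int) × List (Int × Int))
    (ms : List (Int × Int)) : pvAInner nm st ms = ms.foldl (pvAF nm) st := rfl

lemma pvBStep_as_fold (c r nd : Int) (p : Int × Int)
    (st : List (List Int) × List (Int × Int × Int)) :
    pvBStep c r nd p st = pvOffs.foldl (pvBF c r nd p) st := rfl

lemma pvALevel_nil (c r nm : Int) (st : List (List Int) × List (Int × Int)) :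
    pvALevel c r nm st [] = st := rfl

lemma pvALevel_cons (c r nm : Int) (st : List (List Int) × List (Int × Int))
    (p : Int × Int) (vs : List (Int × Int)) :
    pvALevel c r nm st (p :: vs) = pvALevel c r nm (pvAInner nm st (pvMoves p c r)) vs := rfl

lemma pvALoop_succ (c r : Int) (f : Nat) (b : List (List Int)) (vs : List (Int × Int)) (d : Int) :
    pvALoop c r (f + 1) b vs d
      = (if (pvALevel c r (d + 1) (b, []) vs).2 = [] then some (pvALevel c r (d + 1) (b, []) vs).1
         else pvALoop c r f (pvALevel c r (d + 1) (b, []) vs).1 (pvALevel c r (d + 1) (b, []) vs).2 (d + 1)) := rfl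

lemma pvBLoop_nil (c r : Int) (g : Nat) (b : List (List Int)) :
    pvBLoop c r g b [] = some b := by
  cases g <;> rfl

lemma pvBLoop_cons (c r : Int) (f : Nat) (b : List (List Int)) (i j dist : Int)
    (q : List (Int × Int × Int)) :
    pvBLoop c r (f + 1) b ((i, j, dist) :: q)
      = pvBLoop c r f (pvBStep c r (dist + 1) (i, j) (b, q)).1
          (pvBStep c r (dist + 1) (i, j) (b, q)).2 := rfl

lemma pvSLoop_cons (c r : Int) (f : Nat) (b : List (List Int)) (e : Int × Int × Int)
    (q : List (Int × Int × Int)) :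
    pvSLoop c r (f + 1) b (e :: q)
      = pvSLoop c r f
          (pvBStep c r (((e :: q).getLast (List.cons_ne_nil e q)).2.2 + 1)
            (((e :: q).getLast (List.cons_ne_nil e q)).1, ((e :: q).getLast (List.cons_ne_nil e q)).2.1)
            (b, (e :: q).dropLast)).1
          (pvBStep c r (((e :: q).getLast (List.cons_ne_nil e q)).2.2 + 1)
            (((e :: q).getLast (List.cons_ne_nil e q)).1, ((e :: q).getLast (List.cons_ne_nil e q)).2.1)
            (b, (e :: q).dropLast)).2 := rfl

-- ---- cell read/write lemmas ----
lemma pvGet2_set2_cases (b : List (List Int)) (i j v i' j' : Int) :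
    pvGet2 (pvSet2 b i j v) i' j' = v ∨ pvGet2 (pvSet2 b i j v) i' j' = pvGet2 b i' j' := by
  unfold pvGet2 pvSet2
  by_cases hn : i.toNat = i'.toNat
  · rw [hn]
    by_cases hlen : i'.toNat < b.length
    · have hrow : ((b.set i'.toNat ((b.getD i'.toNat []).set j.toNat v)).getD i'.toNat [])
          = (b.getD i'.toNat []).set j.toNat v := by
        rw [List.getD_eq_getElem?_getD, List.getElem?_set, if_pos rfl, if_pos (by simpa using hlen)]
        rfl
      rw [hrow]
      by_cases hm : j.toNat = j'.toNat
      · rw [hm]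
        by_cases hml : j'.toNat < (b.getD i'.toNat []).length
        · left
          rw [List.getD_eq_getElem?_getD, List.getElem?_set, if_pos rfl, if_pos (by simpa using hml)]
          rfl
        · right
          rw [List.set_eq_of_length_le (Nat.le_of_not_lt hml)]
      · right
        rw [List.getD_eq_getElem?_getD, List.getElem?_set, if_neg hm, ← List.getD_eq_getElem?_getD]
    · right
      rw [List.set_eq_of_length_le (Nat.le_of_not_lt hlen)]
  · right
    have : ((b.set i.toNat ((b.getD i.toNat []).set j.toNat v)).getD i'.toNat [])
        = b.getD i'.toNat [] := by
      rw [List.getD_eq_getElem?_getD, List.getElem?_set, if_neg hn, ← List.getD_eq_getElem?_getD]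
    rw [this]

-- strengthened: a changed cell is a toNat-alias of the written one
lemma pvGet2_set2_cases' (b : List (List Int)) (i j v i' j' : Int) :
    pvGet2 (pvSet2 b i j v) i' j' = pvGet2 b i' j'
    ∨ (pvGet2 (pvSet2 b i j v) i' j' = v ∧ i.toNat = i'.toNat ∧ j.toNat = j'.toNat) := by
  unfold pvGet2 pvSet2
  by_cases hn : i.toNat = i'.toNat
  · rw [hn]
    by_cases hlen : i'.toNat < b.length
    · have hrow : ((b.set i'.toNat ((b.getD i'.toNat []).set j.toNat v)).getD i'.toNat [])
          = (b.getD i'.toNat []).set j.toNat v := by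
        rw [List.getD_eq_getElem?_getD, List.getElem?_set, if_pos rfl, if_pos (by simpa using hlen)]
        rfl
      rw [hrow]
      by_cases hm : j.toNat = j'.toNat
      · rw [hm]
        by_cases hml : j'.toNat < (b.getD i'.toNat []).length
        · right
          refine ⟨?_, rfl, rfl⟩
          rw [List.getD_eq_getElem?_getD, List.getElem?_set, if_pos rfl, if_pos (by simpa using hml)]
          rfl
        · left
          rw [List.set_eq_of_length_le (Nat.le_of_not_lt hml)]
      · left
        rw [List.getD_eq_getElem?_getD, List.getElem?_set, if_neg hm, ← List.getD_eq_getElem?_getD]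
    · left
      rw [List.set_eq_of_length_le (Nat.le_of_not_lt hlen)]
  · left
    have : ((b.set i.toNat ((b.getD i.toNat []).set j.toNat v)).getD i'.toNat [])
        = b.getD i'.toNat [] := by
      rw [List.getD_eq_getElem?_getD, List.getElem?_set, if_neg hn, ← List.getD_eq_getElem?_getD]
    rw [this]

lemma pvGet2_eq_of_toNat (b : List (List Int)) {i j i' j' : Int}
    (hi : i.toNat = i'.toNat) (hj : j.toNat = j'.toNat) : pvGet2 b i j = pvGet2 b i' j' := by
  unfold pvGet2
  rw [hi, hj]

lemma pvValLe_set2 {N : Int} {b : List (List Int)} (h : pvValLe N b) {v : Int} (hv : v ≤ N)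
    (i j : Int) : pvValLe N (pvSet2 b i j v) := by
  intro i' j'
  rcases pvGet2_set2_cases b i j v i' j' with h1 | h1 <;> rw [h1]
  · exact hv
  · exact h i' j'

-- ---- potential lemmas ----
lemma pvSumSet (L : List Nat) : ∀ (n : Nat) (x : Nat), n < L.length →
    (L.set n x).sum + L.getD n 0 = L.sum + x := by
  induction L with
  | nil => intro n x h; simp at h
  | cons a L ih =>
    intro n x h
    cases n with
    | zero => simp [List.sum_cons]; omega
    | succ n =>
      have := ih n x (by simpa using h)
      simp only [List.set_cons_succ, List.sum_cons, List.getD_cons_succ]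
      omega

lemma pvSumSetLe (L : List Nat) : ∀ (n : Nat) (x : Nat), (L.set n x).sum ≤ L.sum + x := by
  induction L with
  | nil => intro n x; simp
  | cons a L ih =>
    intro n x
    cases n with
    | zero => simp [List.sum_cons]; omega
    | succ n =>
      have := ih n x
      simp only [List.set_cons_succ, List.sum_cons]
      omega

lemma pvGetD_map_toNat (l : List Int) (n : Nat) (h : n < l.length) :
    (l.map Int.toNat).getD n 0 = (l.getD n 0).toNat := by
  rw [List.getD_eq_getElem?_getD, List.getD_eq_getElem?_getD, List.getElem?_map,
    List.getElem?_eq_getElem h]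
  rfl

lemma pvGetD_map_rowSum (b : List (List Int)) (n : Nat) (h : n < b.length) :
    (b.map pvRowSum).getD n 0 = pvRowSum (b.getD n []) := by
  rw [List.getD_eq_getElem?_getD, List.getD_eq_getElem?_getD, List.getElem?_map,
    List.getElem?_eq_getElem h]
  rfl

lemma pvRowSum_set_le (row : List Int) (m : Nat) (v : Int) :
    pvRowSum (row.set m v) ≤ pvRowSum row + v.toNat := by
  unfold pvRowSum
  rw [List.map_set]
  exact pvSumSetLe _ m v.toNat

lemma pvPhi_set2_le (b : List (List Int)) (i j v : Int) :
    pvPhi (pvSet2 b i j v) ≤ pvPhi b + v.toNat := by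
  unfold pvPhi pvSet2
  by_cases hlen : i.toNat < b.length
  · rw [List.map_set]
    have h1 := pvSumSet (b.map pvRowSum) i.toNat
      (pvRowSum ((b.getD i.toNat []).set j.toNat v)) (by simpa using hlen)
    have h2 := pvRowSum_set_le (b.getD i.toNat []) j.toNat v
    have h3 := pvGetD_map_rowSum b i.toNat hlen
    omega
  · rw [List.set_eq_of_length_le (Nat.le_of_not_lt hlen)]
    omega

lemma pvPhi_set2_dec (b : List (List Int)) (i j v : Int) (h0 : 0 ≤ v) (h : v < pvGet2 b i j) :
    pvPhi (pvSet2 b i j v) + 1 ≤ pvPhi b := by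
  have hpos : 0 < pvGet2 b i j := lt_of_le_of_lt h0 h
  have hlen : i.toNat < b.length := by
    by_contra hc
    have hnone : b[i.toNat]? = none := by
      rw [List.getElem?_eq_none_iff]
      omega
    have hrow : b.getD i.toNat [] = [] := by
      rw [List.getD_eq_getElem?_getD, hnone]
      rfl
    have : pvGet2 b i j = 0 := by
      unfold pvGet2
      rw [hrow]
      rfl
    omega
  have hml : j.toNat < (b.getD i.toNat []).length := by
    by_contra hc
    have hnone : (b.getD i.toNat [])[j.toNat]? = none := by
      rw [List.getElem?_eq_none_iff]; omega
    have : pvGet2 b i j = 0 := by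
      unfold pvGet2
      rw [List.getD_eq_getElem?_getD (l := b.getD i.toNat []), hnone]
      rfl
    omega
  unfold pvPhi pvSet2
  rw [List.map_set]
  have h1 := pvSumSet (b.map pvRowSum) i.toNat
    (pvRowSum ((b.getD i.toNat []).set j.toNat v)) (by simpa using hlen)
  have h3 := pvGetD_map_rowSum b i.toNat hlen
  -- inner row: exact mass change
  have h2 : pvRowSum ((b.getD i.toNat []).set j.toNat v) + (pvGet2 b i j).toNat
      = pvRowSum (b.getD i.toNat []) + v.toNat := by
    unfold pvRowSum
    rw [List.map_set]
    have := pvSumSet ((b.getD i.toNat []).map Int.toNat) j.toNat v.toNat (by simpa using hml)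
    have h4 := pvGetD_map_toNat (b.getD i.toNat []) j.toNat hml
    unfold pvGet2
    omega
  have h5 : v.toNat + 1 ≤ (pvGet2 b i j).toNat := by omega
  omega

-- ---- B-step bookkeeping: one popped candidate cannot increase (pending length + potential),
-- and every pending entry is an old one or carries tag nd ----
lemma pvBFold_bound (c r nd : Int) (p : Int × Int) (hnd : 0 ≤ nd) :
    ∀ (os : List (Int × Int)) (b : List (List Int)) (q : List (Int × Int × Int)),
    (os.foldl (pvBF c r nd p) (b, q)).2.length + pvPhi (os.foldl (pvBF c r nd p) (b, q)).1
        ≤ q.length + pvPhi b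
    ∧ ∀ e ∈ (os.foldl (pvBF c r nd p) (b, q)).2, e ∈ q ∨ e.2.2 = nd := by
  intro os
  induction os with
  | nil =>
    intro b q
    exact ⟨le_refl _, fun e he => Or.inl he⟩
  | cons o os ih =>
    intro b q
    rw [List.foldl_cons]
    by_cases hg : 1 ≤ p.1 + o.1 ∧ p.1 + o.1 ≤ c ∧ 1 ≤ p.2 + o.2 ∧ p.2 + o.2 ≤ r
    · by_cases hv : pvGet2 b (p.1 + o.1) (p.2 + o.2) > nd
      · have hstep : pvBF c r nd p (b, q) o
            = (pvSet2 b (p.1 + o.1) (p.2 + o.2) nd, q ++ [(p.1 + o.1, p.2 + o.2, nd)]) := by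
          unfold pvBF
          rw [if_pos hg, if_pos hv]
        rw [hstep]
        obtain ⟨ih1, ih2⟩ := ih (pvSet2 b (p.1 + o.1) (p.2 + o.2) nd)
          (q ++ [(p.1 + o.1, p.2 + o.2, nd)])
        have hdec := pvPhi_set2_dec b (p.1 + o.1) (p.2 + o.2) nd hnd hv
        constructor
        · simp only [List.length_append, List.length_cons, List.length_nil] at ih1
          omega
        · intro e he
          rcases ih2 e he with h | h
          · rcases List.mem_append.mp h with h' | h'
            · exact Or.inl h'
            · right
              have : e = (p.1 + o.1, p.2 + o.2, nd) := by simpa using h'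
              rw [this]
          · exact Or.inr h
      · have hstep : pvBF c r nd p (b, q) o = (b, q) := by
          unfold pvBF
          rw [if_pos hg, if_neg hv]
        rw [hstep]
        exact ih b q
    · have hstep : pvBF c r nd p (b, q) o = (b, q) := by
        unfold pvBF
        rw [if_neg hg]
      rw [hstep]
      exact ih b q

lemma pvBStep_bound (c r nd : Int) (p : Int × Int) (hnd : 0 ≤ nd) (b : List (List Int))
    (q : List (Int × Int × Int)) :
    (pvBStep c r nd p (b, q)).2.length + pvPhi (pvBStep c r nd p (b, q)).1 ≤ q.length + pvPhi b
    ∧ ∀ e ∈ (pvBStep c r nd p (b, q)).2, e ∈ q ∨ e.2.2 = nd := by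
  rw [pvBStep_as_fold]
  exact pvBFold_bound c r nd p hnd pvOffs b q

-- ---- fuel sufficiency for the FIFO loop ----
lemma pvBLoop_suff (c r : Int) : ∀ (g : Nat) (b : List (List Int)) (q : List (Int × Int × Int)),
    (∀ e ∈ q, 0 ≤ e.2.2) → q.length + pvPhi b ≤ g → (pvBLoop c r g b q).isSome := by
  intro g
  induction g with
  | zero =>
    intro b q hq hbound
    cases q with
    | nil => simp [pvBLoop]
    | cons e q => simp at hbound
  | succ g ih =>
    intro b q hq hbound
    cases q with
    | nil => simp [pvBLoop]
    | cons e q =>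
      obtain ⟨i, j, dist⟩ := e
      have hd : (0:Int) ≤ dist := by
        have := hq (i, j, dist) List.mem_cons_self
        simpa using this
      rw [pvBLoop]
      have hb := pvBStep_bound c r (dist + 1) (i, j) (by omega) b q
      apply ih
      · intro e he
        rcases hb.2 e he with h | h
        · exact hq e (List.mem_cons_of_mem _ h)
        · rw [h]; omega
      · have : q.length + pvPhi b ≤ g := by
          simp only [List.length_cons] at hbound
          omega
        exact le_trans hb.1 this

-- ---- fuel sufficiency for B's stack loop ----
lemma pvSLoop_suff (c r : Int) : ∀ (g : Nat) (b : List (List Int)) (q : List (Int × Int × Int)),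
    (∀ e ∈ q, 0 ≤ e.2.2) → q.length + pvPhi b ≤ g → (pvSLoop c r g b q).isSome := by
  intro g
  induction g with
  | zero =>
    intro b q hq hbound
    cases q with
    | nil => simp [pvSLoop]
    | cons e q => simp at hbound
  | succ g ih =>
    intro b q hq hbound
    cases q with
    | nil => simp [pvSLoop]
    | cons e q =>
      rw [pvSLoop_cons]
      have hL : (e :: q).getLast (List.cons_ne_nil e q) ∈ e :: q := List.getLast_mem _
      have hd : (0:Int) ≤ ((e :: q).getLast (List.cons_ne_nil e q)).2.2 := hq _ hL
      have hb := pvBStep_bound c r (((e :: q).getLast (List.cons_ne_nil e q)).2.2 + 1)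
        (((e :: q).getLast (List.cons_ne_nil e q)).1, ((e :: q).getLast (List.cons_ne_nil e q)).2.1)
        (by omega) b ((e :: q).dropLast)
      apply ih
      · intro x hx
        rcases hb.2 x hx with h | h
        · exact hq x ((fun hh => List.mem_of_mem_dropLast hh) h)
        · rw [h]; omega
      · have hlen : ((e :: q).dropLast).length = q.length := by
          simp [List.length_dropLast]
        simp only [List.length_cons] at hbound
        have := hb.1
        omega

-- ---- A's inner loop: appended accumulator splits off ----
lemma pvAInner_acc (nm : Int) : ∀ (ms : List (Int × Int)) (b : List (List Int)) (acc : List (Int × Int)),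
    pvAInner nm (b, acc) ms
      = ((pvAInner nm (b, []) ms).1, acc ++ (pvAInner nm (b, []) ms).2) := by
  intro ms
  induction ms with
  | nil => intro b acc; simp [pvAInner]
  | cons m ms ih =>
    intro b acc
    rw [pvAInner_as_fold, List.foldl_cons, ← pvAInner_as_fold,
        pvAInner_as_fold (st := (b, [])), List.foldl_cons, ← pvAInner_as_fold]
    by_cases hc : nm < pvGet2 b m.1 m.2
    · have h1 : pvAF nm (b, acc) m = (pvSet2 b m.1 m.2 nm, acc ++ [m]) := by
        unfold pvAF
        rw [if_pos hc]
      have h2 : pvAF nm (b, []) m = (pvSet2 b m.1 m.2 nm, [] ++ [m]) := by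
        unfold pvAF
        rw [if_pos hc]
      rw [h1, h2]
      rw [ih (pvSet2 b m.1 m.2 nm) (acc ++ [m]), ih (pvSet2 b m.1 m.2 nm) ([] ++ [m])]
      simp
    · have h1 : pvAF nm (b, acc) m = (b, acc) := by
        unfold pvAF
        rw [if_neg hc]
      have h2 : pvAF nm (b, []) m = (b, []) := by
        unfold pvAF
        rw [if_neg hc]
      rw [h1, h2, ih b acc]

-- ---- A's move list is B's offset scan ----
lemma pvMoves_eq (p : Int × Int) (c r : Int) :
    pvMoves p c r = (pvOffs.map (fun o => (p.1 + o.1, p.2 + o.2))).filter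
      (fun q => decide (1 ≤ q.1 ∧ q.1 ≤ c ∧ 1 ≤ q.2 ∧ q.2 ≤ r)) := by
  simp only [pvMoves, pvOffs, List.map_cons, List.map_nil, sub_eq_add_neg]

lemma mem_pvMoves_iff (p : Int × Int) (c r : Int) (y : Int × Int) :
    y ∈ pvMoves p c r
      ↔ (∃ o ∈ pvOffs, y = (p.1 + o.1, p.2 + o.2)) ∧ (1 ≤ y.1 ∧ y.1 ≤ c ∧ 1 ≤ y.2 ∧ y.2 ≤ r) := by
  constructor
  · intro h
    rw [pvMoves_eq] at h
    rcases List.mem_filter.mp h with ⟨hm, hp⟩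
    rcases List.mem_map.mp hm with ⟨o, ho, rfl⟩
    exact ⟨⟨o, ho, rfl⟩, by simpa using hp⟩
  · rintro ⟨⟨o, ho, rfl⟩, hb⟩
    rw [pvMoves_eq]
    exact List.mem_filter.mpr ⟨List.mem_map.mpr ⟨o, ho, rfl⟩, by simpa using hb⟩

lemma pvMoves_bounds {p : Int × Int} {c r : Int} {y : Int × Int} (h : y ∈ pvMoves p c r) :
    1 ≤ y.1 ∧ y.1 ≤ c ∧ 1 ≤ y.2 ∧ y.2 ≤ r :=
  ((mem_pvMoves_iff p c r y).mp h).2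

-- ---- one popped candidate in the FIFO loop = A's inner loop over moves(p), pushes appended tagged ----
lemma pvBFold_sim (c r nm : Int) (p : Int × Int) :
    ∀ (os : List (Int × Int)) (b : List (List Int)) (Q : List (Int × Int × Int))
      (acc : List (Int × Int)),
    os.foldl (pvBF c r nm p) (b, Q ++ acc.map (pvTag nm))
      = ((((os.map (fun o => (p.1 + o.1, p.2 + o.2))).filter
            (fun q => decide (1 ≤ q.1 ∧ q.1 ≤ c ∧ 1 ≤ q.2 ∧ q.2 ≤ r))).foldl (pvAF nm) (b, acc)).1,
         Q ++ ((((os.map (fun o => (p.1 + o.1, p.2 + o.2))).filter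
            (fun q => decide (1 ≤ q.1 ∧ q.1 ≤ c ∧ 1 ≤ q.2 ∧ q.2 ≤ r))).foldl (pvAF nm) (b, acc)).2).map (pvTag nm)) := by
  intro os
  induction os with
  | nil => intro b Q acc; simp
  | cons o os ih =>
    intro b Q acc
    rw [List.foldl_cons, List.map_cons, List.filter_cons]
    by_cases hg : 1 ≤ p.1 + o.1 ∧ p.1 + o.1 ≤ c ∧ 1 ≤ p.2 + o.2 ∧ p.2 + o.2 ≤ r
    · rw [if_pos (by simpa using hg), List.foldl_cons]
      by_cases hv : nm < pvGet2 b (p.1 + o.1) (p.2 + o.2)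
      · have h1 : pvBF c r nm p (b, Q ++ acc.map (pvTag nm)) o
            = (pvSet2 b (p.1 + o.1) (p.2 + o.2) nm,
               Q ++ ((acc ++ [(p.1 + o.1, p.2 + o.2)]).map (pvTag nm))) := by
          unfold pvBF
          rw [if_pos hg, if_pos hv]
          simp [pvTag]
        have h2 : pvAF nm (b, acc) (p.1 + o.1, p.2 + o.2)
            = (pvSet2 b (p.1 + o.1) (p.2 + o.2) nm, acc ++ [(p.1 + o.1, p.2 + o.2)]) := by
          unfold pvAF
          rw [if_pos hv]
        rw [h1, h2]
        exact ih (pvSet2 b (p.1 + o.1) (p.2 + o.2) nm) Q (acc ++ [(p.1 + o.1, p.2 + o.2)])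
      · have h1 : pvBF c r nm p (b, Q ++ acc.map (pvTag nm)) o = (b, Q ++ acc.map (pvTag nm)) := by
          unfold pvBF
          rw [if_pos hg, if_neg hv]
        have h2 : pvAF nm (b, acc) (p.1 + o.1, p.2 + o.2) = (b, acc) := by
          unfold pvAF
          rw [if_neg hv]
        rw [h1, h2]
        exact ih b Q acc
    · have h1 : pvBF c r nm p (b, Q ++ acc.map (pvTag nm)) o = (b, Q ++ acc.map (pvTag nm)) := by
        unfold pvBF
        rw [if_neg hg]
      rw [if_neg (by simpa using hg), h1]
      exact ih b Q acc

lemma pvBStep_eq_inner (c r nm : Int) (p : Int × Int) (b : List (List Int))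
    (Q : List (Int × Int × Int)) :
    pvBStep c r nm p (b, Q)
      = ((pvAInner nm (b, []) (pvMoves p c r)).1,
         Q ++ ((pvAInner nm (b, []) (pvMoves p c r)).2).map (pvTag nm)) := by
  have := pvBFold_sim c r nm p pvOffs b Q []
  simp only [List.map_nil, List.append_nil] at this
  rw [pvBStep_as_fold, this, pvMoves_eq, pvAInner_as_fold]

-- ---- level simulation: running the FIFO queue through one of A's levels ----
lemma pvBLoop_level (c r d : Int) : ∀ (vs : List (Int × Int)) (b : List (List Int))
    (nxt : List (Int × Int)) (g : Nat),
    pvBLoop c r g b (vs.map (pvTag d) ++ nxt.map (pvTag (d + 1)))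
      = if g < vs.length then none
        else pvBLoop c r (g - vs.length) (pvALevel c r (d + 1) (b, nxt) vs).1
              (((pvALevel c r (d + 1) (b, nxt) vs).2).map (pvTag (d + 1))) := by
  intro vs
  induction vs with
  | nil =>
    intro b nxt g
    simp [pvALevel_nil]
  | cons p vs ih =>
    intro b nxt g
    have hq : ((p :: vs).map (pvTag d) ++ nxt.map (pvTag (d + 1)))
        = (p.1, p.2, d) :: (vs.map (pvTag d) ++ nxt.map (pvTag (d + 1))) := by
      simp [pvTag]
    rw [hq]
    cases g with
    | zero =>
      rw [show pvBLoop c r 0 b ((p.1, p.2, d) :: (vs.map (pvTag d) ++ nxt.map (pvTag (d + 1)))) = none from rfl]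
      rw [if_pos (by simp)]
    | succ g =>
      rw [pvBLoop_cons, pvBStep_eq_inner]
      have hmerge : (vs.map (pvTag d) ++ nxt.map (pvTag (d + 1)))
            ++ ((pvAInner (d + 1) (b, []) (pvMoves (p.1, p.2) c r)).2).map (pvTag (d + 1))
          = vs.map (pvTag d)
            ++ ((nxt ++ (pvAInner (d + 1) (b, []) (pvMoves (p.1, p.2) c r)).2).map (pvTag (d + 1))) := by
        rw [List.append_assoc, ← List.map_append]
      rw [hmerge]
      rw [ih (pvAInner (d + 1) (b, []) (pvMoves (p.1, p.2) c r)).1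
            (nxt ++ (pvAInner (d + 1) (b, []) (pvMoves (p.1, p.2) c r)).2) g]
      rw [pvALevel_cons]
      rw [pvAInner_acc (d + 1) (pvMoves p c r) b nxt]
      rw [show (p.1, p.2) = p from rfl] at *
      simp only [List.length_cons, Nat.succ_lt_succ_iff, Nat.succ_sub_succ]

-- ---- whole-loop simulation: whenever A's loop returns, the FIFO loop returns the same board ----
lemma pvALoop_bloop (c r : Int) : ∀ (fA : Nat) (b : List (List Int)) (vs : List (Int × Int))
    (d : Int) (res : List (List Int)), pvALoop c r fA b vs d = some res →
    ∀ g : Nat, pvBLoop c r g b (vs.map (pvTag d)) ≠ none →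
      pvBLoop c r g b (vs.map (pvTag d)) = some res := by
  intro fA
  induction fA with
  | zero =>
    intro b vs d res h
    simp [pvALoop] at h
  | succ fA ih =>
    intro b vs d res h g hne
    have hlev := pvBLoop_level c r d vs b [] g
    simp only [List.map_nil, List.append_nil] at hlev
    rw [hlev] at hne ⊢
    by_cases hg : g < vs.length
    · rw [if_pos hg] at hne
      exact absurd rfl hne
    · rw [if_neg hg] at hne ⊢
      rw [pvALoop_succ] at h
      by_cases hs : (pvALevel c r (d + 1) (b, []) vs).2 = []
      · rw [if_pos hs] at h
        rw [hs]
        simp only [List.map_nil]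
        rw [pvBLoop_nil]
        exact h
      · rw [if_neg hs] at h
        exact ih (pvALevel c r (d + 1) (b, []) vs).1 (pvALevel c r (d + 1) (b, []) vs).2
          (d + 1) res h (g - vs.length) hne

-- ---- A stalls once nm ≥ N ----
lemma pvAInner_stall {N nm : Int} (hnm : N ≤ nm) : ∀ (ms : List (Int × Int))
    (b : List (List Int)) (acc : List (Int × Int)), pvValLe N b →
    pvAInner nm (b, acc) ms = (b, acc) := by
  intro ms
  induction ms with
  | nil => intro b acc _; rfl
  | cons m ms ih =>
    intro b acc hval
    rw [pvAInner_as_fold, List.foldl_cons, ← pvAInner_as_fold]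
    have hstep : pvAF nm (b, acc) m = (b, acc) := by
      unfold pvAF
      rw [if_neg (by dsimp only; have := hval m.1 m.2; omega)]
    rw [hstep]
    exact ih b acc hval

lemma pvALevel_stall {N : Int} (c r nm : Int) (hnm : N ≤ nm) :
    ∀ (vs : List (Int × Int)) (b : List (List Int)), pvValLe N b →
    pvALevel c r nm (b, []) vs = (b, []) := by
  intro vs
  induction vs with
  | nil => intro b _; rfl
  | cons p vs ih =>
    intro b hval
    rw [pvALevel_cons, pvAInner_stall hnm _ b [] hval]
    exact ih b hval

-- ---- writes in a level keep all cells ≤ N ----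
lemma pvAInner_valLe {N nm : Int} : ∀ (ms : List (Int × Int)) (b : List (List Int))
    (acc : List (Int × Int)), pvValLe N b → pvValLe N (pvAInner nm (b, acc) ms).1 := by
  intro ms
  induction ms with
  | nil => intro b acc h; exact h
  | cons m ms ih =>
    intro b acc hval
    rw [pvAInner_as_fold, List.foldl_cons, ← pvAInner_as_fold]
    by_cases hc : nm < pvGet2 b m.1 m.2
    · have hstep : pvAF nm (b, acc) m = (pvSet2 b m.1 m.2 nm, acc ++ [m]) := by
        unfold pvAF
        rw [if_pos hc]
      rw [hstep]
      have hnm : nm ≤ N := le_of_lt (lt_of_lt_of_le hc (hval m.1 m.2))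
      exact ih _ _ (pvValLe_set2 hval hnm m.1 m.2)
    · have hstep : pvAF nm (b, acc) m = (b, acc) := by
        unfold pvAF
        rw [if_neg hc]
      rw [hstep]
      exact ih b acc hval

lemma pvALevel_valLe {N : Int} (c r nm : Int) : ∀ (vs : List (Int × Int)) (b : List (List Int))
    (acc : List (Int × Int)), pvValLe N b → pvValLe N (pvALevel c r nm (b, acc) vs).1 := by
  intro vs
  induction vs with
  | nil => intro b acc h; exact h
  | cons p vs ih =>
    intro b acc hval
    rw [pvALevel_cons]
    exact ih (pvAInner nm (b, acc) (pvMoves p c r)).1 (pvAInner nm (b, acc) (pvMoves p c r)).2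
      (pvAInner_valLe _ b acc hval)

-- ---- fuel sufficiency for A's loop ----
lemma pvALoop_suff {N : Int} (c r : Int) : ∀ (f : Nat) (b : List (List Int))
    (vs : List (Int × Int)) (d : Int), pvValLe N b → (N - d).toNat + 1 ≤ f →
    ∃ res, pvALoop c r f b vs d = some res := by
  intro f
  induction f with
  | zero => intro b vs d _ hf; omega
  | succ f ih =>
    intro b vs d hval hf
    by_cases hN : N ≤ d + 1
    · refine ⟨b, ?_⟩
      rw [pvALoop_succ, pvALevel_stall c r (d + 1) hN vs b hval]
      simp
    · by_cases hs : (pvALevel c r (d + 1) (b, []) vs).2 = []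
      · exact ⟨_, by rw [pvALoop_succ, if_pos hs]⟩
      · obtain ⟨res, hres⟩ := ih (pvALevel c r (d + 1) (b, []) vs).1
          (pvALevel c r (d + 1) (b, []) vs).2 (d + 1)
          (pvALevel_valLe c r (d + 1) vs b [] hval) (by omega)
        exact ⟨res, by rw [pvALoop_succ, if_neg hs]; exact hres⟩

-- ---- initial-board facts ----
lemma pvGet2_replicate_le (C R : Nat) (N : Int) (hN : 0 ≤ N) (i j : Int) :
    pvGet2 (List.replicate C (List.replicate R N)) i j ≤ N := by
  unfold pvGet2
  by_cases hi : i.toNat < C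
  · rw [List.getD_eq_getElem?_getD (l := List.replicate C (List.replicate R N)),
      List.getElem?_replicate, if_pos hi]
    simp only [Option.getD_some]
    by_cases hj : j.toNat < R
    · rw [List.getD_eq_getElem?_getD, List.getElem?_replicate, if_pos hj]
      exact le_rfl
    · rw [List.getD_eq_getElem?_getD, List.getElem?_replicate, if_neg hj]
      exact hN
  · rw [List.getD_eq_getElem?_getD (l := List.replicate C (List.replicate R N)),
      List.getElem?_replicate, if_neg hi]
    simpa using hN

lemma pvPhi_replicate (C R : Nat) (N : Int) :
    pvPhi (List.replicate C (List.replicate R N)) = C * (R * N.toNat) := by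
  simp [pvPhi, pvRowSum, List.map_replicate, List.sum_replicate, smul_eq_mul]

lemma pvSetStart_valLe {N : Int} {b : List (List Int)} (h : pvValLe N b) (hN : 0 ≤ N)
    (i j : Int) : pvValLe N (pvSetStart b i j 0) := by
  unfold pvSetStart
  exact pvValLe_set2 h hN _ _

lemma pvSetStart_phi_le (b : List (List Int)) (i j : Int) :
    pvPhi (pvSetStart b i j 0) ≤ pvPhi b := by
  unfold pvSetStart
  simpa using pvPhi_set2_le b _ _ 0

-- ==========================================================================================
-- ---- confluence development: queue final board = stack final board ----
-- ==========================================================================================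

-- well-formedness: the board keeps its (c+1)×(r+1) shape
def pvWf (c r : Int) (b : List (List Int)) : Prop :=
  b.length = (c + 1).toNat ∧ ∀ row ∈ b, row.length = (r + 1).toNat

lemma pvWf_set2 (c r : Int) {b : List (List Int)} (h : pvWf c r b) (i j v : Int) :
    pvWf c r (pvSet2 b i j v) := by
  by_cases hl : i.toNat < b.length
  · obtain ⟨h1, h2⟩ := h
    constructor
    · simpa [pvSet2] using h1
    · intro row hrow
      unfold pvSet2 at hrow
      rcases List.mem_or_eq_of_mem_set hrow with hm | hm
      · exact h2 row hm
      · subst hm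
        rw [List.length_set]
        have hb : b.getD i.toNat [] ∈ b := by
          rw [List.getD_eq_getElem?_getD, List.getElem?_eq_getElem hl]
          exact List.getElem_mem _
        exact h2 _ hb
  · have heq : pvSet2 b i j v = b := by
      unfold pvSet2
      rw [List.set_eq_of_length_le (Nat.le_of_not_lt hl)]
    rw [heq]
    exact h

lemma pvWf_init (c r : Int) :
    pvWf c r (List.replicate (c + 1).toNat (List.replicate (r + 1).toNat (r * c))) := by
  constructor
  · simp
  · intro row hrow
    rw [List.eq_of_mem_replicate hrow]
    simp

lemma pvWf_setStart (c r : Int) {b : List (List Int)} (h : pvWf c r b) (i j v : Int) :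
    pvWf c r (pvSetStart b i j v) := by
  unfold pvSetStart
  exact pvWf_set2 c r h _ _ _

-- read-after-write at the written (in-range) cell
lemma pvGet2_set2_self (c r : Int) {b : List (List Int)} (hwf : pvWf c r b) {i j : Int}
    (hi0 : 0 ≤ i) (hic : i ≤ c) (hj0 : 0 ≤ j) (hjr : j ≤ r) (v : Int) :
    pvGet2 (pvSet2 b i j v) i j = v := by
  have hlen : i.toNat < b.length := by
    rw [hwf.1]
    omega
  have hrow : b.getD i.toNat [] ∈ b := by
    rw [List.getD_eq_getElem?_getD, List.getElem?_eq_getElem hlen]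
    exact List.getElem_mem _
  have hml : j.toNat < (b.getD i.toNat []).length := by
    rw [hwf.2 _ hrow]
    omega
  unfold pvGet2 pvSet2
  have hrow2 : ((b.set i.toNat ((b.getD i.toNat []).set j.toNat v)).getD i.toNat [])
      = (b.getD i.toNat []).set j.toNat v := by
    rw [List.getD_eq_getElem?_getD, List.getElem?_set, if_pos rfl, if_pos hlen]
    rfl
  rw [hrow2, List.getD_eq_getElem?_getD, List.getElem?_set, if_pos rfl, if_pos hml]
  rfl

lemma pvSetStart_nonneg (b : List (List Int)) {i j : Int} (hi : 0 ≤ i) (hj : 0 ≤ j) (v : Int) :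
    pvSetStart b i j v = pvSet2 b i j v := by
  have h : pvSetStart b i j v
      = pvSet2 b (if i < 0 then i + b.length else i)
          (if j < 0 then j + (b.getD (if i < 0 then i + (b.length : Int) else i).toNat []).length else j) v := rfl
  rw [h, if_neg (by omega), if_neg (by omega)]

-- "writable label" relation: pvWr d y holds when a chain of in-bounds knight moves from the
-- source S can deposit label d at y, each hop strictly below the INITIAL board value there.
-- Both the FIFO and the LIFO run are proved sound and complete for it, which pins the final
-- board down uniquely.
inductive pvWr (c r : Int) (b0 : List (List Int)) (S : Int × Int) : Int → Int × Int → Prop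
  | zero : pvWr c r b0 S 0 S
  | succ {d : Int} {x y : Int × Int} :
      pvWr c r b0 S d x → y ∈ pvMoves x c r → d + 1 < pvGet2 b0 y.1 y.2 → pvWr c r b0 S (d + 1) y

-- the six structural facts about one pvBStep, by induction over the offset fold
lemma pvBFold_props (c r nd : Int) (p : Int × Int) :
    ∀ (os : List (Int × Int)) (b : List (List Int)) (q : List (Int × Int × Int)),
    (∀ o ∈ os, o ∈ pvOffs) → pvWf c r b →
    pvWf c r (os.foldl (pvBF c r nd p) (b, q)).1
    ∧ (∀ i j : Int, pvGet2 (os.foldl (pvBF c r nd p) (b, q)).1 i j ≤ pvGet2 b i j)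
    ∧ (∀ e ∈ q, e ∈ (os.foldl (pvBF c r nd p) (b, q)).2)
    ∧ (∀ e ∈ (os.foldl (pvBF c r nd p) (b, q)).2,
        e ∈ q ∨ (e.2.2 = nd ∧ (e.1, e.2.1) ∈ pvMoves p c r ∧ nd < pvGet2 b e.1 e.2.1))
    ∧ (∀ o ∈ os, (1 ≤ p.1 + o.1 ∧ p.1 + o.1 ≤ c ∧ 1 ≤ p.2 + o.2 ∧ p.2 + o.2 ≤ r) →
        pvGet2 (os.foldl (pvBF c r nd p) (b, q)).1 (p.1 + o.1) (p.2 + o.2) ≤ nd)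
    ∧ (∀ i j : Int, 0 ≤ i → 0 ≤ j →
        pvGet2 (os.foldl (pvBF c r nd p) (b, q)).1 i j < pvGet2 b i j →
        pvGet2 (os.foldl (pvBF c r nd p) (b, q)).1 i j = nd
          ∧ (i, j, nd) ∈ (os.foldl (pvBF c r nd p) (b, q)).2 ∧ (i, j) ∈ pvMoves p c r) := by
  intro os
  induction os with
  | nil =>
    intro b q _ hwf
    refine ⟨hwf, fun i j => le_refl _, fun e he => he, fun e he => Or.inl he,
      fun o ho => absurd ho (List.not_mem_nil), ?_⟩
    intro i j _ _ hlt
    exact absurd hlt (lt_irrefl _)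
  | cons o os ih =>
    intro b q hos hwf
    rw [List.foldl_cons]
    by_cases hg : 1 ≤ p.1 + o.1 ∧ p.1 + o.1 ≤ c ∧ 1 ≤ p.2 + o.2 ∧ p.2 + o.2 ≤ r
    · by_cases hv : pvGet2 b (p.1 + o.1) (p.2 + o.2) > nd
      · have hstep : pvBF c r nd p (b, q) o
            = (pvSet2 b (p.1 + o.1) (p.2 + o.2) nd, q ++ [(p.1 + o.1, p.2 + o.2, nd)]) := by
          unfold pvBF
          rw [if_pos hg, if_pos hv]
        rw [hstep]
        have hwf1 : pvWf c r (pvSet2 b (p.1 + o.1) (p.2 + o.2) nd) := pvWf_set2 c r hwf _ _ _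
        have hmem : (p.1 + o.1, p.2 + o.2) ∈ pvMoves p c r :=
          (mem_pvMoves_iff p c r _).mpr ⟨⟨o, hos o List.mem_cons_self, rfl⟩, hg⟩
        have hle1 : ∀ i j : Int, pvGet2 (pvSet2 b (p.1 + o.1) (p.2 + o.2) nd) i j ≤ pvGet2 b i j := by
          intro i j
          rcases pvGet2_set2_cases' b (p.1 + o.1) (p.2 + o.2) nd i j with h | ⟨h, ha, hb⟩
          · rw [h]
          · rw [h, pvGet2_eq_of_toNat b ha.symm hb.symm]
            omega
        obtain ⟨iwf, ile, imem, inew, imv, ichg⟩ :=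
          ih (pvSet2 b (p.1 + o.1) (p.2 + o.2) nd) (q ++ [(p.1 + o.1, p.2 + o.2, nd)])
            (fun o' ho' => hos o' (List.mem_cons_of_mem _ ho')) hwf1
        refine ⟨iwf, ?_, ?_, ?_, ?_, ?_⟩
        · intro i j
          exact le_trans (ile i j) (hle1 i j)
        · intro e he
          exact imem e (List.mem_append.mpr (Or.inl he))
        · intro e he
          rcases inew e he with h | ⟨h1, h2, h3⟩
          · rcases List.mem_append.mp h with h' | h'
            · exact Or.inl h'
            · right
              have he2 : e = (p.1 + o.1, p.2 + o.2, nd) := by simpa using h'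
              subst he2
              exact ⟨rfl, hmem, hv⟩
          · exact Or.inr ⟨h1, h2, lt_of_lt_of_le h3 (hle1 _ _)⟩
        · intro o' ho' hb'
          rcases List.mem_cons.mp ho' with h' | h'
          · rw [h'] at hb' ⊢
            have hself : pvGet2 (pvSet2 b (p.1 + o.1) (p.2 + o.2) nd) (p.1 + o.1) (p.2 + o.2) = nd :=
              pvGet2_set2_self c r hwf (by omega) (by omega) (by omega) (by omega) nd
            calc pvGet2 _ (p.1 + o.1) (p.2 + o.2) ≤ _ := ile (p.1 + o.1) (p.2 + o.2)
              _ = nd := hself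
          · exact imv o' h' hb'
        · intro i j hi hj hlt
          by_cases hcase :
              pvGet2 ((os.foldl (pvBF c r nd p) (pvSet2 b (p.1 + o.1) (p.2 + o.2) nd,
                q ++ [(p.1 + o.1, p.2 + o.2, nd)]))).1 i j
              < pvGet2 (pvSet2 b (p.1 + o.1) (p.2 + o.2) nd) i j
          · exact ichg i j hi hj hcase
          · have heq : pvGet2 ((os.foldl (pvBF c r nd p) (pvSet2 b (p.1 + o.1) (p.2 + o.2) nd,
                q ++ [(p.1 + o.1, p.2 + o.2, nd)]))).1 i j
                = pvGet2 (pvSet2 b (p.1 + o.1) (p.2 + o.2) nd) i j := by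
              have := ile i j
              omega
            rw [heq] at hlt ⊢
            rcases pvGet2_set2_cases' b (p.1 + o.1) (p.2 + o.2) nd i j with h | ⟨h, ha, hb⟩
            · rw [h] at hlt
              exact absurd hlt (lt_irrefl _)
            · have hieq : i = p.1 + o.1 := by omega
              have hjeq : j = p.2 + o.2 := by omega
              subst hieq; subst hjeq
              exact ⟨h, imem _ (List.mem_append.mpr (Or.inr List.mem_cons_self)), hmem⟩
      · have hstep : pvBF c r nd p (b, q) o = (b, q) := by
          unfold pvBF
          rw [if_pos hg, if_neg hv]
        rw [hstep]
        obtain ⟨iwf, ile, imem, inew, imv, ichg⟩ :=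
          ih b q (fun o' ho' => hos o' (List.mem_cons_of_mem _ ho')) hwf
        refine ⟨iwf, ile, imem, inew, ?_, ichg⟩
        intro o' ho' hb'
        rcases List.mem_cons.mp ho' with h' | h'
        · rw [h'] at hb' ⊢
          have : pvGet2 b (p.1 + o.1) (p.2 + o.2) ≤ nd := by omega
          exact le_trans (ile _ _) this
        · exact imv o' h' hb'
    · have hstep : pvBF c r nd p (b, q) o = (b, q) := by
        unfold pvBF
        rw [if_neg hg]
      rw [hstep]
      obtain ⟨iwf, ile, imem, inew, imv, ichg⟩ :=
        ih b q (fun o' ho' => hos o' (List.mem_cons_of_mem _ ho')) hwf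
      refine ⟨iwf, ile, imem, inew, ?_, ichg⟩
      intro o' ho' hb'
      rcases List.mem_cons.mp ho' with h' | h'
      · rw [h'] at hb'
        exact absurd hb' hg
      · exact imv o' h' hb'

lemma pvBStep_props (c r nd : Int) (p : Int × Int) (b s1 : List (List Int))
    (q s2 : List (Int × Int × Int)) (hwf : pvWf c r b)
    (hs : pvBStep c r nd p (b, q) = (s1, s2)) :
    pvWf c r s1
    ∧ (∀ i j : Int, pvGet2 s1 i j ≤ pvGet2 b i j)
    ∧ (∀ e ∈ q, e ∈ s2)
    ∧ (∀ e ∈ s2, e ∈ q ∨ (e.2.2 = nd ∧ (e.1, e.2.1) ∈ pvMoves p c r ∧ nd < pvGet2 b e.1 e.2.1))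
    ∧ (∀ y ∈ pvMoves p c r, pvGet2 s1 y.1 y.2 ≤ nd)
    ∧ (∀ i j : Int, 0 ≤ i → 0 ≤ j → pvGet2 s1 i j < pvGet2 b i j →
        pvGet2 s1 i j = nd ∧ (i, j, nd) ∈ s2 ∧ (i, j) ∈ pvMoves p c r) := by
  have hfold : pvOffs.foldl (pvBF c r nd p) (b, q) = (s1, s2) := by
    rw [← pvBStep_as_fold]
    exact hs
  obtain ⟨iwf, ile, imem, inew, imv, ichg⟩ :=
    pvBFold_props c r nd p pvOffs b q (fun _ h => h) hwf
  rw [hfold] at iwf ile imem inew imv ichg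
  refine ⟨iwf, ile, imem, inew, ?_, ichg⟩
  intro y hy
  rcases (mem_pvMoves_iff p c r y).mp hy with ⟨⟨o, ho, rfl⟩, hb⟩
  exact imv o ho hb

-- one generic pop step for the RUN facts (instantiated with head pops and last pops)
lemma pvRun_step (c r : Int) (b bF s1 : List (List Int)) (L : Int × Int × Int)
    (R P s2 : List (Int × Int × Int)) (hwf : pvWf c r b)
    (hs : pvBStep c r (L.2.2 + 1) (L.1, L.2.1) (b, R) = (s1, s2))
    (hP : ∀ e ∈ P, e ∈ R ∨ e = L)
    (hI2 : ∀ i j : Int, pvGet2 bF i j ≤ pvGet2 s1 i j)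
    (hI3 : ∀ e ∈ s2, ∀ y ∈ pvMoves (e.1, e.2.1) c r, pvGet2 bF y.1 y.2 ≤ e.2.2 + 1)
    (hI4 : ∀ i j : Int, 0 ≤ i → 0 ≤ j → pvGet2 bF i j < pvGet2 s1 i j →
      ∀ y ∈ pvMoves (i, j) c r, pvGet2 bF y.1 y.2 ≤ pvGet2 bF i j + 1) :
    (∀ i j : Int, pvGet2 bF i j ≤ pvGet2 b i j)
    ∧ (∀ e ∈ P, ∀ y ∈ pvMoves (e.1, e.2.1) c r, pvGet2 bF y.1 y.2 ≤ e.2.2 + 1)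
    ∧ (∀ i j : Int, 0 ≤ i → 0 ≤ j → pvGet2 bF i j < pvGet2 b i j →
        ∀ y ∈ pvMoves (i, j) c r, pvGet2 bF y.1 y.2 ≤ pvGet2 bF i j + 1) := by
  obtain ⟨swf, sle, smem, snew, smv, schg⟩ := pvBStep_props c r (L.2.2 + 1) (L.1, L.2.1) b s1 R s2 hwf hs
  refine ⟨?_, ?_, ?_⟩
  · intro i j
    exact le_trans (hI2 i j) (sle i j)
  · intro e he y hy
    rcases hP e he with h | h
    · exact hI3 e (smem e h) y hy
    · subst h
      have := smv y hy
      have := hI2 y.1 y.2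
      omega
  · intro i j hi hj hlt y hy
    by_cases hcase : pvGet2 bF i j < pvGet2 s1 i j
    · exact hI4 i j hi hj hcase y hy
    · have heq : pvGet2 bF i j = pvGet2 s1 i j := by
        have := hI2 i j
        omega
      have hs1lt : pvGet2 s1 i j < pvGet2 b i j := by omega
      obtain ⟨hnd, hmem2, _⟩ := schg i j hi hj hs1lt
      have := hI3 (i, j, L.2.2 + 1) hmem2 y hy
      simp only at this
      omega

-- RUN facts for the FIFO loop
lemma pvBLoop_run (c r : Int) : ∀ (f : Nat) (b : List (List Int)) (P : List (Int × Int × Int))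
    (bF : List (List Int)), pvWf c r b → pvBLoop c r f b P = some bF →
    pvWf c r bF
    ∧ (∀ i j : Int, pvGet2 bF i j ≤ pvGet2 b i j)
    ∧ (∀ e ∈ P, ∀ y ∈ pvMoves (e.1, e.2.1) c r, pvGet2 bF y.1 y.2 ≤ e.2.2 + 1)
    ∧ (∀ i j : Int, 0 ≤ i → 0 ≤ j → pvGet2 bF i j < pvGet2 b i j →
        ∀ y ∈ pvMoves (i, j) c r, pvGet2 bF y.1 y.2 ≤ pvGet2 bF i j + 1) := by
  intro f
  induction f with
  | zero =>
    intro b P bF hwf hrun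
    cases P with
    | nil =>
      have hb : b = bF := by simpa [pvBLoop] using hrun
      subst hb
      refine ⟨hwf, fun i j => le_refl _, fun e he => absurd he (List.not_mem_nil), ?_⟩
      intro i j _ _ hlt
      exact absurd hlt (lt_irrefl _)
    | cons e q => simp [pvBLoop] at hrun
  | succ f ih =>
    intro b P bF hwf hrun
    cases P with
    | nil =>
      have hb : b = bF := by simpa [pvBLoop] using hrun
      subst hb
      refine ⟨hwf, fun i j => le_refl _, fun e he => absurd he (List.not_mem_nil), ?_⟩
      intro i j _ _ hlt
      exact absurd hlt (lt_irrefl _)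
    | cons e q =>
      obtain ⟨ei, ej, ed⟩ := e
      rw [pvBLoop_cons] at hrun
      have hs : pvBStep c r (ed + 1) (ei, ej) (b, q)
          = ((pvBStep c r (ed + 1) (ei, ej) (b, q)).1, (pvBStep c r (ed + 1) (ei, ej) (b, q)).2) := rfl
      have hwf1 : pvWf c r (pvBStep c r (ed + 1) (ei, ej) (b, q)).1 :=
        (pvBStep_props c r (ed + 1) (ei, ej) b _ q _ hwf hs).1
      obtain ⟨iwf, ile, iP, ichg⟩ := ih _ _ bF hwf1 hrun
      obtain ⟨c1, c2, c3⟩ := pvRun_step c r b bF _ (ei, ej, ed) q ((ei, ej, ed) :: q) _ hwf hs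
        (fun x hx => by
          rcases List.mem_cons.mp hx with h | h
          · exact Or.inr h
          · exact Or.inl h)
        ile iP ichg
      exact ⟨iwf, c1, c2, c3⟩

-- RUN facts for B's stack loop
lemma pvSLoop_run (c r : Int) : ∀ (f : Nat) (b : List (List Int)) (P : List (Int × Int × Int))
    (bF : List (List Int)), pvWf c r b → pvSLoop c r f b P = some bF →
    pvWf c r bF
    ∧ (∀ i j : Int, pvGet2 bF i j ≤ pvGet2 b i j)
    ∧ (∀ e ∈ P, ∀ y ∈ pvMoves (e.1, e.2.1) c r, pvGet2 bF y.1 y.2 ≤ e.2.2 + 1)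
    ∧ (∀ i j : Int, 0 ≤ i → 0 ≤ j → pvGet2 bF i j < pvGet2 b i j →
        ∀ y ∈ pvMoves (i, j) c r, pvGet2 bF y.1 y.2 ≤ pvGet2 bF i j + 1) := by
  intro f
  induction f with
  | zero =>
    intro b P bF hwf hrun
    cases P with
    | nil =>
      have hb : b = bF := by simpa [pvSLoop] using hrun
      subst hb
      refine ⟨hwf, fun i j => le_refl _, fun e he => absurd he (List.not_mem_nil), ?_⟩
      intro i j _ _ hlt
      exact absurd hlt (lt_irrefl _)
    | cons e q => simp [pvSLoop] at hrun
  | succ f ih =>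
    intro b P bF hwf hrun
    cases P with
    | nil =>
      have hb : b = bF := by simpa [pvSLoop] using hrun
      subst hb
      refine ⟨hwf, fun i j => le_refl _, fun e he => absurd he (List.not_mem_nil), ?_⟩
      intro i j _ _ hlt
      exact absurd hlt (lt_irrefl _)
    | cons e q =>
      rw [pvSLoop_cons] at hrun
      have hs : pvBStep c r (((e :: q).getLast (List.cons_ne_nil e q)).2.2 + 1)
            (((e :: q).getLast (List.cons_ne_nil e q)).1, ((e :: q).getLast (List.cons_ne_nil e q)).2.1)
            (b, (e :: q).dropLast)
          = ((pvBStep c r (((e :: q).getLast (List.cons_ne_nil e q)).2.2 + 1)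
              (((e :: q).getLast (List.cons_ne_nil e q)).1, ((e :: q).getLast (List.cons_ne_nil e q)).2.1)
              (b, (e :: q).dropLast)).1,
             (pvBStep c r (((e :: q).getLast (List.cons_ne_nil e q)).2.2 + 1)
              (((e :: q).getLast (List.cons_ne_nil e q)).1, ((e :: q).getLast (List.cons_ne_nil e q)).2.1)
              (b, (e :: q).dropLast)).2) := rfl
      have hwf1 := (pvBStep_props c r _ _ b _ _ _ hwf hs).1
      obtain ⟨iwf, ile, iP, ichg⟩ := ih _ _ bF hwf1 hrun
      have hsplit : (e :: q).dropLast ++ [(e :: q).getLast (List.cons_ne_nil e q)] = e :: q :=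
        List.dropLast_append_getLast _
      obtain ⟨c1, c2, c3⟩ := pvRun_step c r b bF _ ((e :: q).getLast (List.cons_ne_nil e q))
        ((e :: q).dropLast) (e :: q) _ hwf hs
        (fun x hx => by
          rw [← hsplit] at hx
          rcases List.mem_append.mp hx with h | h
          · exact Or.inl h
          · exact Or.inr (by simpa using h))
        ile iP ichg
      exact ⟨iwf, c1, c2, c3⟩

-- one generic pop step for the SOUNDNESS invariants
lemma pvSound_step (c r : Int) (b0 b s1 : List (List Int)) (S : Int × Int) (L : Int × Int × Int)
    (R s2 : List (Int × Int × Int)) (hwf : pvWf c r b)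
    (hs : pvBStep c r (L.2.2 + 1) (L.1, L.2.1) (b, R) = (s1, s2))
    (hle : ∀ i j : Int, pvGet2 b i j ≤ pvGet2 b0 i j)
    (hWrL : pvWr c r b0 S L.2.2 (L.1, L.2.1))
    (hWrR : ∀ e ∈ R, pvWr c r b0 S e.2.2 (e.1, e.2.1))
    (hinv : ∀ i j : Int, 0 ≤ i → 0 ≤ j →
      pvGet2 b i j = pvGet2 b0 i j ∨ pvWr c r b0 S (pvGet2 b i j) (i, j)) :
    pvWf c r s1
    ∧ (∀ i j : Int, pvGet2 s1 i j ≤ pvGet2 b0 i j)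
    ∧ (∀ e ∈ s2, pvWr c r b0 S e.2.2 (e.1, e.2.1))
    ∧ (∀ i j : Int, 0 ≤ i → 0 ≤ j →
        pvGet2 s1 i j = pvGet2 b0 i j ∨ pvWr c r b0 S (pvGet2 s1 i j) (i, j)) := by
  obtain ⟨swf, sle, smem, snew, smv, schg⟩ := pvBStep_props c r (L.2.2 + 1) (L.1, L.2.1) b s1 R s2 hwf hs
  refine ⟨swf, ?_, ?_, ?_⟩
  · intro i j
    exact le_trans (sle i j) (hle i j)
  · intro e he
    rcases snew e he with h | ⟨h1, h2, h3⟩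
    · exact hWrR e h
    · rw [h1]
      exact pvWr.succ hWrL h2 (lt_of_lt_of_le h3 (hle _ _))
  · intro i j hi hj
    by_cases hcase : pvGet2 s1 i j < pvGet2 b i j
    · obtain ⟨hnd, _, hmv⟩ := schg i j hi hj hcase
      right
      rw [hnd]
      exact pvWr.succ hWrL hmv (by rw [← hnd]; exact lt_of_lt_of_le hcase (hle i j))
    · have heq : pvGet2 s1 i j = pvGet2 b i j := by
        have := sle i j
        omega
      rw [heq]
      exact hinv i j hi hj

-- soundness for the FIFO loop
lemma pvBLoop_sound (c r : Int) (b0 : List (List Int)) (S : Int × Int) :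
    ∀ (f : Nat) (b : List (List Int)) (P : List (Int × Int × Int)) (bF : List (List Int)),
    pvWf c r b →
    (∀ i j : Int, pvGet2 b i j ≤ pvGet2 b0 i j) →
    (∀ e ∈ P, pvWr c r b0 S e.2.2 (e.1, e.2.1)) →
    (∀ i j : Int, 0 ≤ i → 0 ≤ j → pvGet2 b i j = pvGet2 b0 i j ∨ pvWr c r b0 S (pvGet2 b i j) (i, j)) →
    pvBLoop c r f b P = some bF →
    ∀ i j : Int, 0 ≤ i → 0 ≤ j →
      pvGet2 bF i j = pvGet2 b0 i j ∨ pvWr c r b0 S (pvGet2 bF i j) (i, j) := by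
  intro f
  induction f with
  | zero =>
    intro b P bF hwf hle hWr hinv hrun
    cases P with
    | nil =>
      have hb : b = bF := by simpa [pvBLoop] using hrun
      subst hb
      exact hinv
    | cons e q => simp [pvBLoop] at hrun
  | succ f ih =>
    intro b P bF hwf hle hWr hinv hrun
    cases P with
    | nil =>
      have hb : b = bF := by simpa [pvBLoop] using hrun
      subst hb
      exact hinv
    | cons e q =>
      obtain ⟨ei, ej, ed⟩ := e
      rw [pvBLoop_cons] at hrun
      have hs : pvBStep c r (ed + 1) (ei, ej) (b, q)
          = ((pvBStep c r (ed + 1) (ei, ej) (b, q)).1, (pvBStep c r (ed + 1) (ei, ej) (b, q)).2) := rfl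
      obtain ⟨swf, sle, sWr, sinv⟩ := pvSound_step c r b0 b _ S (ei, ej, ed) q _ hwf hs hle
        (hWr _ List.mem_cons_self) (fun x hx => hWr x (List.mem_cons_of_mem _ hx)) hinv
      exact ih _ _ bF swf sle sWr sinv hrun

-- soundness for B's stack loop
lemma pvSLoop_sound (c r : Int) (b0 : List (List Int)) (S : Int × Int) :
    ∀ (f : Nat) (b : List (List Int)) (P : List (Int × Int × Int)) (bF : List (List Int)),
    pvWf c r b →
    (∀ i j : Int, pvGet2 b i j ≤ pvGet2 b0 i j) →
    (∀ e ∈ P, pvWr c r b0 S e.2.2 (e.1, e.2.1)) →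
    (∀ i j : Int, 0 ≤ i → 0 ≤ j → pvGet2 b i j = pvGet2 b0 i j ∨ pvWr c r b0 S (pvGet2 b i j) (i, j)) →
    pvSLoop c r f b P = some bF →
    ∀ i j : Int, 0 ≤ i → 0 ≤ j →
      pvGet2 bF i j = pvGet2 b0 i j ∨ pvWr c r b0 S (pvGet2 bF i j) (i, j) := by
  intro f
  induction f with
  | zero =>
    intro b P bF hwf hle hWr hinv hrun
    cases P with
    | nil =>
      have hb : b = bF := by simpa [pvSLoop] using hrun
      subst hb
      exact hinv
    | cons e q => simp [pvSLoop] at hrun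
  | succ f ih =>
    intro b P bF hwf hle hWr hinv hrun
    cases P with
    | nil =>
      have hb : b = bF := by simpa [pvSLoop] using hrun
      subst hb
      exact hinv
    | cons e q =>
      rw [pvSLoop_cons] at hrun
      have hs : pvBStep c r (((e :: q).getLast (List.cons_ne_nil e q)).2.2 + 1)
            (((e :: q).getLast (List.cons_ne_nil e q)).1, ((e :: q).getLast (List.cons_ne_nil e q)).2.1)
            (b, (e :: q).dropLast)
          = ((pvBStep c r (((e :: q).getLast (List.cons_ne_nil e q)).2.2 + 1)
              (((e :: q).getLast (List.cons_ne_nil e q)).1, ((e :: q).getLast (List.cons_ne_nil e q)).2.1)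
              (b, (e :: q).dropLast)).1,
             (pvBStep c r (((e :: q).getLast (List.cons_ne_nil e q)).2.2 + 1)
              (((e :: q).getLast (List.cons_ne_nil e q)).1, ((e :: q).getLast (List.cons_ne_nil e q)).2.1)
              (b, (e :: q).dropLast)).2) := rfl
      obtain ⟨swf, sle, sWr, sinv⟩ := pvSound_step c r b0 b _ S
        ((e :: q).getLast (List.cons_ne_nil e q)) ((e :: q).dropLast) _ hwf hs hle
        (hWr _ (List.getLast_mem _)) (fun x hx => hWr x ((fun hh => List.mem_of_mem_dropLast hh) hx)) hinv
      exact ih _ _ bF swf sle sWr sinv hrun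

-- completeness: every writable label bounds the final board (for any complete run)
lemma pvComplete (c r : Int) (b1 bF : List (List Int)) (S : Int × Int)
    (h3 : ∀ y ∈ pvMoves S c r, pvGet2 bF y.1 y.2 ≤ 1)
    (h4 : ∀ i j : Int, 0 ≤ i → 0 ≤ j → pvGet2 bF i j < pvGet2 b1 i j →
      ∀ y ∈ pvMoves (i, j) c r, pvGet2 bF y.1 y.2 ≤ pvGet2 bF i j + 1) :
    ∀ (d : Int) (y : Int × Int), pvWr c r b1 S d y →
      (d = 0 ∧ y = S)
      ∨ (pvGet2 bF y.1 y.2 ≤ d ∧ pvGet2 bF y.1 y.2 < pvGet2 b1 y.1 y.2 ∧ 1 ≤ y.1 ∧ 1 ≤ y.2) := by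
  intro d y h
  induction h with
  | zero => exact Or.inl ⟨rfl, rfl⟩
  | @succ d x y hx hmem hlt ih =>
    right
    obtain ⟨hy1, hyc, hy2, hyr⟩ := pvMoves_bounds hmem
    rcases ih with ⟨hd0, hxS⟩ | ⟨hble, hblt, hx1, hx2⟩
    · subst hd0
      subst hxS
      have hb := h3 y hmem
      exact ⟨by omega, by omega, hy1, hy2⟩
    · have h4x := h4 x.1 x.2 (by omega) (by omega) hblt y hmem
      exact ⟨by omega, by omega, hy1, hy2⟩

-- uniqueness: two complete runs agree pointwise
lemma pvFinal_le (c r : Int) (b1 bF1 bF2 : List (List Int)) (S : Int × Int)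
    (hsound1 : ∀ i j : Int, 0 ≤ i → 0 ≤ j →
      pvGet2 bF1 i j = pvGet2 b1 i j ∨ pvWr c r b1 S (pvGet2 bF1 i j) (i, j))
    (hle2 : ∀ i j : Int, pvGet2 bF2 i j ≤ pvGet2 b1 i j)
    (hcomp2 : ∀ (d : Int) (y : Int × Int), pvWr c r b1 S d y →
      (d = 0 ∧ y = S)
      ∨ (pvGet2 bF2 y.1 y.2 ≤ d ∧ pvGet2 bF2 y.1 y.2 < pvGet2 b1 y.1 y.2 ∧ 1 ≤ y.1 ∧ 1 ≤ y.2))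
    (hS0 : 0 ≤ S.1 → 0 ≤ S.2 → pvGet2 b1 S.1 S.2 = 0) :
    ∀ i j : Int, 0 ≤ i → 0 ≤ j → pvGet2 bF2 i j ≤ pvGet2 bF1 i j := by
  intro i j hi hj
  rcases hsound1 i j hi hj with h | h
  · rw [h]
    exact hle2 i j
  · rcases hcomp2 _ _ h with ⟨hd0, hyS⟩ | ⟨hb, _, _, _⟩
    · have hSij : S = (i, j) := hyS.symm
      have hb10 : pvGet2 b1 i j = 0 := by
        have := hS0 (by rw [hSij]; exact hi) (by rw [hSij]; exact hj)
        rw [hSij] at this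
        exact this
      have := hle2 i j
      omega
    · exact hb

-- boards with the same shape and the same nonnegative reads are equal
lemma pvEq_of_wf (c r : Int) {b b' : List (List Int)} (h : pvWf c r b) (h' : pvWf c r b')
    (hp : ∀ i j : Int, 0 ≤ i → 0 ≤ j → pvGet2 b i j = pvGet2 b' i j) : b = b' := by
  apply List.ext_getElem (by rw [h.1, h'.1])
  intro n h1 h2
  apply List.ext_getElem
  · rw [h.2 _ (List.getElem_mem h1), h'.2 _ (List.getElem_mem h2)]
  · intro m hm1 hm2
    have hrow : b.getD n [] = b[n] := by
      rw [List.getD_eq_getElem?_getD, List.getElem?_eq_getElem h1]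
      rfl
    have hrow' : b'.getD n [] = b'[n] := by
      rw [List.getD_eq_getElem?_getD, List.getElem?_eq_getElem h2]
      rfl
    have hg := hp (n : Int) (m : Int) (Int.natCast_nonneg n) (Int.natCast_nonneg m)
    unfold pvGet2 at hg
    rw [Int.toNat_natCast, Int.toNat_natCast, hrow, hrow'] at hg
    rw [List.getD_eq_getElem?_getD, List.getElem?_eq_getElem hm1] at hg
    rw [List.getD_eq_getElem?_getD, List.getElem?_eq_getElem hm2] at hg
    exact hg

-- ===== VERDICT (by name: the statement is the Claim_ definition above) =====
theorem fill_min_board_spec : Claim_equal_fill_min_board := by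
  intro r c kr kc hdom hpre
  obtain ⟨h1, h2, h3, h4⟩ := hpre
  have hr : (0:Int) ≤ r := by omega
  have hcn : (0:Int) ≤ c := by omega
  have hN : (0:Int) ≤ r * c := mul_nonneg hr hcn
  unfold Spec_fill_min_board fill_min_board fill_min_board_alt
  show (pvALoop c r (r * c + 2).toNat
          (pvSetStart (List.replicate (c + 1).toNat (List.replicate (r + 1).toNat (r * c))) kc kr 0)
          [(kc, kr)] 0).getD _
      = (pvSLoop c r (r * c * (r + 1) * (c + 1) + 2).toNat
          (pvSetStart (List.replicate (c + 1).toNat (List.replicate (r + 1).toNat (r * c))) kc kr 0)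
          [(kc, kr, 0)]).getD _
  set b1 := pvSetStart (List.replicate (c + 1).toNat (List.replicate (r + 1).toNat (r * c))) kc kr 0 with hb1def
  have hval1 : pvValLe (r * c) b1 :=
    pvSetStart_valLe (fun i j => pvGet2_replicate_le _ _ _ hN i j) hN kc kr
  have hwf1 : pvWf c r b1 := pvWf_setStart c r (pvWf_init c r) kc kr 0
  obtain ⟨res, hA⟩ := pvALoop_suff (N := r * c) c r (r * c + 2).toNat b1 [(kc, kr)] 0 hval1 (by omega)
  have hphi : pvPhi b1 ≤ (c + 1).toNat * ((r + 1).toNat * (r * c).toNat) :=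
    le_trans (pvSetStart_phi_le _ _ _) (le_of_eq (pvPhi_replicate _ _ _))
  have hfuel : 1 + pvPhi b1 ≤ (r * c * (r + 1) * (c + 1) + 2).toNat := by
    have hcast : (r * c * (r + 1) * (c + 1) + 2)
        = (((r * c).toNat * (r + 1).toNat * (c + 1).toNat + 2 : Nat) : Int) := by
      push_cast
      rw [Int.toNat_of_nonneg hN, Int.toNat_of_nonneg (by omega : (0:Int) ≤ r + 1),
        Int.toNat_of_nonneg (by omega : (0:Int) ≤ c + 1)]
    rw [hcast, Int.toNat_natCast]
    have hmul : (c + 1).toNat * ((r + 1).toNat * (r * c).toNat)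
        = (r * c).toNat * (r + 1).toNat * (c + 1).toNat := by ring
    omega
  have hpend0 : ∀ e ∈ ([(kc, kr, 0)] : List (Int × Int × Int)), (0:Int) ≤ e.2.2 := by
    intro e he
    have : e = (kc, kr, 0) := by simpa using he
    rw [this]
  have hlen0 : ([(kc, kr, 0)] : List (Int × Int × Int)).length + pvPhi b1
      ≤ (r * c * (r + 1) * (c + 1) + 2).toNat := by
    simpa using hfuel
  -- FIFO run returns some board, and it is A's result (the level simulation)
  have hBsome : (pvBLoop c r (r * c * (r + 1) * (c + 1) + 2).toNat b1 [(kc, kr, 0)]).isSome :=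
    pvBLoop_suff c r _ b1 [(kc, kr, 0)] hpend0 hlen0
  obtain ⟨resB, hB⟩ := Option.isSome_iff_exists.mp hBsome
  have hEq := pvALoop_bloop c r _ b1 [(kc, kr)] 0 res hA
    (r * c * (r + 1) * (c + 1) + 2).toNat
    (by rw [show ([(kc, kr)].map (pvTag 0)) = [(kc, kr, 0)] from rfl, hB]; simp)
  rw [show ([(kc, kr)].map (pvTag 0)) = [(kc, kr, 0)] from rfl] at hEq
  -- the stack run also returns some board
  have hSsome : (pvSLoop c r (r * c * (r + 1) * (c + 1) + 2).toNat b1 [(kc, kr, 0)]).isSome :=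
    pvSLoop_suff c r _ b1 [(kc, kr, 0)] hpend0 hlen0
  obtain ⟨resS, hS⟩ := Option.isSome_iff_exists.mp hSsome
  -- characterize both final boards and conclude they are equal
  have hWr0 : ∀ e ∈ ([(kc, kr, 0)] : List (Int × Int × Int)),
      pvWr c r b1 (kc, kr) e.2.2 (e.1, e.2.1) := by
    intro e he
    have : e = (kc, kr, 0) := by simpa using he
    subst this
    exact pvWr.zero
  obtain ⟨hwfQ, hleQ, hPQ, hchgQ⟩ := pvBLoop_run c r _ b1 [(kc, kr, 0)] res hwf1 hEq
  obtain ⟨hwfS, hleS, hPS, hchgS⟩ := pvSLoop_run c r _ b1 [(kc, kr, 0)] resS hwf1 hS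
  have hsoQ := pvBLoop_sound c r b1 (kc, kr) _ b1 [(kc, kr, 0)] res hwf1
    (fun i j => le_refl _) hWr0 (fun i j _ _ => Or.inl rfl) hEq
  have hsoS := pvSLoop_sound c r b1 (kc, kr) _ b1 [(kc, kr, 0)] resS hwf1
    (fun i j => le_refl _) hWr0 (fun i j _ _ => Or.inl rfl) hS
  have hS0 : 0 ≤ (kc, kr).1 → 0 ≤ (kc, kr).2 → pvGet2 b1 (kc, kr).1 (kc, kr).2 = 0 := by
    intro hkc hkr
    rw [hb1def, pvSetStart_nonneg _ hkc hkr]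
    exact pvGet2_set2_self c r (pvWf_init c r) hkc h2 hkr h4 0
  have hinitQ : ∀ y ∈ pvMoves (kc, kr) c r, pvGet2 res y.1 y.2 ≤ 1 := by
    intro y hy
    have := hPQ (kc, kr, 0) List.mem_cons_self y hy
    simpa using this
  have hinitS : ∀ y ∈ pvMoves (kc, kr) c r, pvGet2 resS y.1 y.2 ≤ 1 := by
    intro y hy
    have := hPS (kc, kr, 0) List.mem_cons_self y hy
    simpa using this
  have hcompQ := pvComplete c r b1 res (kc, kr) hinitQ hchgQ
  have hcompS := pvComplete c r b1 resS (kc, kr) hinitS hchgS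
  have hle12 := pvFinal_le c r b1 res resS (kc, kr) hsoQ hleS hcompS hS0
  have hle21 := pvFinal_le c r b1 resS res (kc, kr) hsoS hleQ hcompQ hS0
  have hfinal : res = resS := by
    apply pvEq_of_wf c r hwfQ hwfS
    intro i j hi hj
    have := hle12 i j hi hj
    have := hle21 i j hi hj
    omega
  rw [hA, hS, hfinal]
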